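-- pv_equiv track=rewrite | github.com/Vergil0327/leetcode-history | 2-D Dynamic Programming/DigitDP/3906. Count Good Integers on a Grid Path/solution.py | countGoodIntegersOnPath
-- ===== SOURCE A (Python) =====
-- from functools import lru_cache
--
-- def countGoodIntegersOnPath(l: int, r: int, directions: str) -> int:
--     # Determine the 7 indices visited on the 4x4 grid
--     path_indices = [0] # Starting at (0, 0) -> index 0
--     r_coord, c_coord = 0, 0
--     for move in directions:
--         if move == 'D':
--             r_coord += 1
--         else:
--             c_coord += 1
--         path_indices.append(r_coord * 4 + c_coord)
--
--     # Convert path_indices to a set for O(1) lookup during DP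
--     path_set = set(path_indices)
--
--
--     def count_upto(n_str: str) -> int:
--         # Ensure the number string is exactly 16 digits for row-major mapping
--         n_str = n_str.zfill(16)
--
--         @lru_cache(None)
--         def dp(pos, is_tight, prev_digit):
--             if pos == 16: return 1
--
--             res = 0
--             upper = int(n_str[pos]) if is_tight else 9
--
--             for digit in range(upper + 1):
--                 new_tight = is_tight and (digit == upper)
--
--                 # If this position is on the path, we must satisfy non-decreasing property
--                 if pos in path_set:
--                     if digit >= prev_digit:
--                         res += dp(pos + 1, new_tight, digit)
--                 else:
--                     # Not on the path, any digit is fine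
--                     res += dp(pos + 1, new_tight, prev_digit)
--             return res
--
--         return dp(0, True, 0)
--
--     return count_upto(str(r)) - count_upto(str(l - 1))
-- ===== SOURCE B (Python) =====
-- def countGoodIntegersOnPath(l: int, r: int, directions: str) -> int:
--     row, col = 0, 0
--     path = {0}
--     for move in directions:
--         if move == 'D':
--             row += 1
--         else:
--             col += 1
--         path.add(row * 4 + col)
--
--     def count_upto(n: int) -> int:
--         s = str(n).zfill(16)
--         # Backward tabulation: for the position just after the last digit every
--         # state has exactly one completion (the empty one).
--         free_tab = [1] * 10   # completions when the bound is already loose, by prev digit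
--         tight_tab = [1] * 10  # completions while still tight against s, by prev digit
--         for pos in range(15, -1, -1):
--             on_path = pos in path
--             cur = int(s[pos])
--
--             def completions(hi, keep_tight, prev):
--                 total = 0
--                 for d in range(hi + 1):
--                     nxt = tight_tab if (keep_tight and d == hi) else free_tab
--                     if on_path:
--                         if d >= prev:
--                             total += nxt[d]
--                     else:
--                         total += nxt[prev]
--                 return total
--
--             new_free = [completions(9, False, p) for p in range(10)]
--             new_tight = [completions(cur, True, p) for p in range(10)]
--             free_tab, tight_tab = new_free, new_tight
--         return tight_tab[0]
--
--     return count_upto(r) - count_upto(l - 1)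
-- ===== Notes on version B (the rewrite author's own statement) =====
-- stated objective: alternative
-- what changed: count_upto's memoized top-down digit-DP recursion is replaced by an iterative backward tabulation that carries two 10-entry tables (tight/loose, indexed by previous digit) from position 16 down to 0.
import Mathlib
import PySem

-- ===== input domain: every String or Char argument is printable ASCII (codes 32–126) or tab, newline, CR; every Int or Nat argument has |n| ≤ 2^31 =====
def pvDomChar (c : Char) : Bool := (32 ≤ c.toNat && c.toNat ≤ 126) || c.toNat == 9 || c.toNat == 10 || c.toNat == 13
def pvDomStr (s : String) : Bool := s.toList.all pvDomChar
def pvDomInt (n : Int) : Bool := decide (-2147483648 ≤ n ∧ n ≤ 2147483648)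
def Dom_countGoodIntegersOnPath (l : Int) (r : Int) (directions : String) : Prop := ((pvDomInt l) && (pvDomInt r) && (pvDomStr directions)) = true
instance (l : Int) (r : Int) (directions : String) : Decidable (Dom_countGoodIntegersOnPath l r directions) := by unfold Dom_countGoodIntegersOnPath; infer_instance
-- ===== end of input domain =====

-- B replaces A's memoized top-down digit-DP recursion by an iterative backward tabulation
-- over two 10-entry tables (tight/loose, indexed by previous digit); same cost (objective: alternative).

-- ===== PORT A =====

-- int(c) for a single character c: its digit value when c is an ASCII digit (exact there);
-- Python raises ValueError on any other Dom character — those inputs lie outside Pre_,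
-- where this total helper returns the junk default 0.
def pvDig (s : List Char) (pos : Int) : Int :=
  match PySem.List.pyGet? s pos with
  | some c => if 48 ≤ c.toNat ∧ c.toNat ≤ 57 then (c.toNat : Int) - 48 else 0
  | none => 0

abbrev pvMemo := PySem.Dict (Int × Bool × Int) Int

-- the lru_cache-memoized dp: the cache is threaded explicitly; fuel = 16 - pos
-- (the fuel-0 fallback is unreachable on the calls made below)
def pvDpA (s : List Char) (pset : PySem.Set Int) :
    Nat → Int → Bool → Int → pvMemo → Int × pvMemo
  | fuel, pos, tight, prev, cache =>
    if pos = 16 then (1, cache)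
    else
      match cache.get? (pos, tight, prev) with
      | some v => (v, cache)
      | none =>
        match fuel with
        | 0 => (0, cache)
        | fuel' + 1 =>
          let upper : Int := if tight then pvDig s pos else 9
          let rc :=
            (PySem.List.pyRange 0 (upper + 1) 1).foldl
              (fun (acc : Int × pvMemo) d =>
                if pset.contains pos then
                  if prev ≤ d then
                    let vc := pvDpA s pset fuel' (pos + 1) (tight && (d == upper)) d acc.2
                    (acc.1 + vc.1, vc.2)
                  else acc
                else
                  let vc := pvDpA s pset fuel' (pos + 1) (tight && (d == upper)) prev acc.2
                  (acc.1 + vc.1, vc.2))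
              (0, cache)
          (rc.1, rc.2.insert (pos, tight, prev) rc.1)

def pvCountUptoA (nstr : List Char) (pset : PySem.Set Int) : Int :=
  (pvDpA (PySem.Chars.zfill nstr 16) pset 16 0 true 0 PySem.Dict.empty).1

def pvPathListA (directions : String) : List Int :=
  (directions.toList.foldl
    (fun (st : Int × Int × List Int) move =>
      let rc := if move == 'D' then st.1 + 1 else st.1
      let cc := if move == 'D' then st.2.1 else st.2.1 + 1
      (rc, cc, st.2.2 ++ [rc * 4 + cc]))
    (0, 0, [0])).2.2

def countGoodIntegersOnPath (l : Int) (r : Int) (directions : String) : Int :=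
  let pset := PySem.Set.ofList (pvPathListA directions)
  pvCountUptoA (PySem.Int.toChars r) pset - pvCountUptoA (PySem.Int.toChars (l - 1)) pset

-- ===== PORT B =====

def pvCompletionsB (onPath : Bool) (freeTab tightTab : List Int)
    (hi : Int) (keepTight : Bool) (prev : Int) : Int :=
  (PySem.List.pyRange 0 (hi + 1) 1).foldl
    (fun total d =>
      let nxt := if keepTight && (d == hi) then tightTab else freeTab
      if onPath then
        if prev ≤ d then total + PySem.List.pyGetD nxt d 0 else total
      else total + PySem.List.pyGetD nxt prev 0)
    0

def pvCountUptoB (n : Int) (pset : PySem.Set Int) : Int :=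
  let s := PySem.Chars.zfill (PySem.Int.toChars n) 16
  let tabs :=
    (PySem.List.pyRange 15 (-1) (-1)).foldl
      (fun (tabs : List Int × List Int) pos =>
        let onPath := pset.contains pos
        let cur := pvDig s pos
        ((PySem.List.pyRange 0 10 1).map (fun p => pvCompletionsB onPath tabs.1 tabs.2 9 false p),
         (PySem.List.pyRange 0 10 1).map (fun p => pvCompletionsB onPath tabs.1 tabs.2 cur true p)))
      (List.replicate 10 1, List.replicate 10 1)
  PySem.List.pyGetD tabs.2 0 0

def pvPathSetB (directions : String) : PySem.Set Int :=
  (directions.toList.foldl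
    (fun (st : Int × Int × PySem.Set Int) move =>
      let rc := if move == 'D' then st.1 + 1 else st.1
      let cc := if move == 'D' then st.2.1 else st.2.1 + 1
      (rc, cc, PySem.Set.add st.2.2 (rc * 4 + cc)))
    (0, 0, PySem.Set.ofList [0])).2.2

def countGoodIntegersOnPath_alt (l : Int) (r : Int) (directions : String) : Int :=
  let pset := pvPathSetB directions
  pvCountUptoB r pset - pvCountUptoB (l - 1) pset

-- ===== PRECONDITION & SPEC =====
-- Pre_ excludes exactly the inputs where Python A raises ValueError: for l ≤ 0 or r < 0 the
-- string str(l-1) resp. str(r) carries a '-' sign and int() of that character fails.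
def Pre_countGoodIntegersOnPath (l : Int) (r : Int) (directions : String) : Prop :=
  1 ≤ l ∧ 0 ≤ r
instance (l : Int) (r : Int) (directions : String) : Decidable (Pre_countGoodIntegersOnPath l r directions) := by
  unfold Pre_countGoodIntegersOnPath; infer_instance

def pvWitness_countGoodIntegersOnPath : Int × Int × String := (1, 20, "DRD")

def Spec_countGoodIntegersOnPath (l : Int) (r : Int) (directions : String) (out : Int) : Prop := out = countGoodIntegersOnPath_alt l r directions
instance (l : Int) (r : Int) (directions : String) (out : Int) : Decidable (Spec_countGoodIntegersOnPath l r directions out) := by unfold Spec_countGoodIntegersOnPath; infer_instance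

-- ===== CLAIM (what is proved, stated in full; the proofs are below) =====
def Claim_equal_countGoodIntegersOnPath : Prop := ∀ (l : Int) (r : Int) (directions : String), Dom_countGoodIntegersOnPath l r directions → Pre_countGoodIntegersOnPath l r directions → Spec_countGoodIntegersOnPath l r directions (countGoodIntegersOnPath l r directions)

-- ===== LEMMAS AND PROOFS =====

-- the common mathematical value of the digit DP (proof artifact; neither port calls it)
def pvPure (s : List Char) (pset : PySem.Set Int) : Nat → Int → Bool → Int → Int
  | fuel, pos, tight, prev =>
    if pos = 16 then 1
    else
      match fuel with
      | 0 => 0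
      | fuel' + 1 =>
        let upper : Int := if tight then pvDig s pos else 9
        (PySem.List.pyRange 0 (upper + 1) 1).foldl
          (fun acc d =>
            if pset.contains pos then
              if prev ≤ d then acc + pvPure s pset fuel' (pos + 1) (tight && (d == upper)) d
              else acc
            else acc + pvPure s pset fuel' (pos + 1) (tight && (d == upper)) prev)
          0
def pvCacheOK (s : List Char) (pset : PySem.Set Int) (c : pvMemo) : Prop :=
  ∀ pos t p v, c.get? (pos, t, p) = some v → v = pvPure s pset (16 - pos).toNat pos t p


lemma pvFoldlPair {alpha beta gamma : Type} (P : beta → Prop) (f : alpha × beta → gamma → alpha × beta)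
    (g : alpha → gamma → alpha)
    (h : ∀ a b x, P b → (f (a, b) x).1 = g a x ∧ P (f (a, b) x).2) :
    ∀ (ds : List gamma) (a : alpha) (b : beta), P b →
      (ds.foldl f (a, b)).1 = ds.foldl g a ∧ P (ds.foldl f (a, b)).2 := by
  intro ds
  induction ds with
  | nil => intro a b hb; exact ⟨rfl, hb⟩
  | cons x ds ihd =>
    intro a b hb
    simp only [List.foldl_cons]
    obtain ⟨h1, h2⟩ := h a b x hb
    have : f (a, b) x = ((f (a, b) x).1, (f (a, b) x).2) := rfl
    rw [this, h1]
    exact ihd _ _ h2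

lemma pvDpA_pure (s : List Char) (pset : PySem.Set Int) :
    ∀ (fuel : Nat) (pos : Int) (tight : Bool) (prev : Int) (cache : pvMemo),
      pos + fuel = 16 → pvCacheOK s pset cache →
      (pvDpA s pset fuel pos tight prev cache).1 = pvPure s pset fuel pos tight prev ∧
      pvCacheOK s pset (pvDpA s pset fuel pos tight prev cache).2 := by
  intro fuel
  induction fuel with
  | zero =>
    intro pos tight prev cache hpos hc
    have h16 : pos = 16 := by omega
    subst h16
    rw [pvDpA.eq_def, pvPure.eq_def]
    exact ⟨rfl, hc⟩
  | succ fuel' ih =>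
    intro pos tight prev cache hpos hc
    have h16 : ¬ (pos = 16) := by omega
    rw [pvDpA.eq_def, pvPure.eq_def]
    simp only [if_neg h16]
    cases hget : cache.get? (pos, tight, prev) with
    | some v =>
      simp only []
      have hv := hc pos tight prev v hget
      have h17 : (16 - pos).toNat = fuel' + 1 := by omega
      rw [h17, pvPure.eq_def] at hv
      simp only [if_neg h16] at hv
      exact ⟨hv, hc⟩
    | none =>
      simp only []
      have key := pvFoldlPair (pvCacheOK s pset)
        (fun (accc : Int × pvMemo) d =>
          if pset.contains pos then
            if prev ≤ d then
              let vc := pvDpA s pset fuel' (pos + 1) (tight && (d == if tight then pvDig s pos else 9)) d accc.2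
              (accc.1 + vc.1, vc.2)
            else accc
          else
            let vc := pvDpA s pset fuel' (pos + 1) (tight && (d == if tight then pvDig s pos else 9)) prev accc.2
            (accc.1 + vc.1, vc.2))
        (fun acc d =>
          if pset.contains pos then
            if prev ≤ d then acc + pvPure s pset fuel' (pos + 1) (tight && (d == if tight then pvDig s pos else 9)) d
            else acc
          else acc + pvPure s pset fuel' (pos + 1) (tight && (d == if tight then pvDig s pos else 9)) prev)
        (by
          intro a b x hb
          by_cases hp : pset.contains pos = true
          · by_cases hle : prev ≤ x
            · simp only [hp, if_true, if_pos hle]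
              refine ⟨?_, (ih (pos + 1) _ x b (by omega) hb).2⟩
              rw [(ih (pos + 1) _ x b (by omega) hb).1]
            · simp only [hp, if_true, if_neg hle]
              exact ⟨by trivial, hb⟩
          · simp only [hp, if_false, Bool.false_eq_true]
            refine ⟨?_, (ih (pos + 1) _ prev b (by omega) hb).2⟩
            rw [(ih (pos + 1) _ prev b (by omega) hb).1])
        (PySem.List.pyRange 0 ((if tight then pvDig s pos else 9) + 1) 1) 0 cache hc
      obtain ⟨he, hck⟩ := key
      refine ⟨he, ?_⟩
      intro pos2 t2 p2 v hv
      by_cases hk : ((pos2, t2, p2) : Int × Bool × Int) = (pos, tight, prev)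
      · obtain ⟨e1, e2, e3⟩ : pos2 = pos ∧ t2 = tight ∧ p2 = prev := by
          simpa [Prod.ext_iff] using hk
        rw [hk] at hv
        rw [PySem.Dict.get?_insert_self] at hv
        rw [e1, e2, e3]
        have h17 : (16 - pos).toNat = fuel' + 1 := by omega
        rw [h17, pvPure.eq_def]
        simp only [if_neg h16]
        rw [← he]
        exact (Option.some.inj hv).symm
      · rw [PySem.Dict.get?_insert_of_ne _ _ hk] at hv
        exact hck pos2 t2 p2 v hv

lemma pvDig_range (s : List Char) (pos : Int) : 0 ≤ pvDig s pos ∧ pvDig s pos ≤ 9 := by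
  unfold pvDig
  cases PySem.List.pyGet? s pos with
  | none => simp
  | some c => dsimp only; split <;> omega

lemma pvCompletionsB_pure (s : List Char) (pset : PySem.Set Int) (pos : Int) (fuel' : Nat)
    (keep : Bool) (hi prev : Int)
    (hhi : hi = if keep then pvDig s pos else 9)
    (hprev0 : 0 ≤ prev) (hprev9 : prev ≤ 9) (h16 : ¬ pos = 16) :
    pvCompletionsB (pset.contains pos)
      ((PySem.List.pyRange 0 10 1).map (fun p => pvPure s pset fuel' (pos + 1) false p))
      ((PySem.List.pyRange 0 10 1).map (fun p => pvPure s pset fuel' (pos + 1) true p))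
      hi keep prev
    = pvPure s pset (fuel' + 1) pos keep prev := by
  have hd9 : hi ≤ 9 := by
    rcases pvDig_range s pos with ⟨h1, h2⟩
    rw [hhi]; split <;> omega
  rw [pvPure.eq_def]
  simp only [if_neg h16]
  unfold pvCompletionsB
  rw [← hhi]
  apply PySem.List.foldl_congr_mem
  intro acc d hd
  rw [PySem.List.mem_pyRange_one] at hd
  have hget : ∀ (b : Bool) (x : Int), 0 ≤ x → x ≤ 9 →
      PySem.List.pyGetD ((PySem.List.pyRange 0 10 1).map (fun p => pvPure s pset fuel' (pos + 1) b p)) x 0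
        = pvPure s pset fuel' (pos + 1) b x := by
    intro b x h0 h9
    exact PySem.List.pyGetD_map_pyRange_of_nonneg _ 10 x 0 h0 (by omega)
  by_cases hb : (keep && (d == hi)) = true
  · simp only [hb, if_true]
    by_cases hp : pset.contains pos = true
    · simp only [hp, if_true]
      by_cases hle : prev ≤ d
      · simp only [if_pos hle, hget true d hd.1 (by omega)]
      · simp only [if_neg hle]
    · simp only [hp, if_false, Bool.false_eq_true, hget true prev hprev0 hprev9]
  · simp only [hb, if_false, Bool.false_eq_true]
    by_cases hp : pset.contains pos = true
    · simp only [hp, if_true]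
      by_cases hle : prev ≤ d
      · simp only [if_pos hle, hget false d hd.1 (by omega)]
      · simp only [if_neg hle]
    · simp only [hp, if_false, Bool.false_eq_true, hget false prev hprev0 hprev9]

def pvDowns : Nat → List Int
  | 0 => []
  | m + 1 => (m : Int) :: pvDowns m

lemma pvRange_down : PySem.List.pyRange 15 (-1) (-1) = pvDowns 16 := by decide

lemma pvLoopB (s : List Char) (pset : PySem.Set Int) :
    ∀ (m : Nat), m ≤ 16 → ∀ (tabs : List Int × List Int),
      tabs.1 = (PySem.List.pyRange 0 10 1).map (fun p => pvPure s pset (16 - m) (m : Int) false p) →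
      tabs.2 = (PySem.List.pyRange 0 10 1).map (fun p => pvPure s pset (16 - m) (m : Int) true p) →
      (((pvDowns m).foldl
        (fun (tabs : List Int × List Int) pos =>
          let onPath := pset.contains pos
          let cur := pvDig s pos
          ((PySem.List.pyRange 0 10 1).map (fun p => pvCompletionsB onPath tabs.1 tabs.2 9 false p),
           (PySem.List.pyRange 0 10 1).map (fun p => pvCompletionsB onPath tabs.1 tabs.2 cur true p)))
        tabs).2)
      = (PySem.List.pyRange 0 10 1).map (fun p => pvPure s pset 16 0 true p) := by
  intro m
  induction m with
  | zero =>
    intro _ tabs h1 h2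
    simpa using h2
  | succ m ihm =>
    intro hm tabs h1 h2
    rw [pvDowns]
    simp only [List.foldl_cons]
    apply ihm (by omega)
    · dsimp only
      rw [h1, h2]
      apply List.map_congr_left
      intro p hp
      rw [PySem.List.mem_pyRange_one] at hp
      have hc : (16 - m) = (16 - (m + 1)) + 1 := by omega
      rw [hc]
      have := pvCompletionsB_pure s pset (m : Int) (16 - (m + 1)) false 9 p rfl hp.1 (by omega) (by omega)
      rw [← this]
      norm_num
    · dsimp only
      rw [h1, h2]
      apply List.map_congr_left
      intro p hp
      rw [PySem.List.mem_pyRange_one] at hp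
      have hc : (16 - m) = (16 - (m + 1)) + 1 := by omega
      rw [hc]
      have := pvCompletionsB_pure s pset (m : Int) (16 - (m + 1)) true (pvDig s (m : Int)) p rfl hp.1 (by omega) (by omega)
      rw [← this]
      norm_num
lemma pvPath_gen (ms : List Char) : ∀ (a b : Int) (acc : List Int),
    (ms.foldl
      (fun (st : Int × Int × PySem.Set Int) move =>
        let rc := if move == 'D' then st.1 + 1 else st.1
        let cc := if move == 'D' then st.2.1 else st.2.1 + 1
        (rc, cc, PySem.Set.add st.2.2 (rc * 4 + cc)))
      (a, b, PySem.Set.ofList acc)).2.2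
    = PySem.Set.ofList
      ((ms.foldl
        (fun (st : Int × Int × List Int) move =>
          let rc := if move == 'D' then st.1 + 1 else st.1
          let cc := if move == 'D' then st.2.1 else st.2.1 + 1
          (rc, cc, st.2.2 ++ [rc * 4 + cc]))
        (a, b, acc)).2.2) := by
  induction ms with
  | nil => intro a b acc; rfl
  | cons m ms ih =>
    intro a b acc
    simp only [List.foldl_cons]
    rw [← PySem.Set.ofList_append_singleton]
    exact ih _ _ _

lemma pvPath_eq (directions : String) :
    PySem.Set.ofList (pvPathListA directions) = pvPathSetB directions := by
  unfold pvPathListA pvPathSetB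
  exact (pvPath_gen directions.toList 0 0 [0]).symm

lemma pvCacheOK_empty (s : List Char) (pset : PySem.Set Int) :
    pvCacheOK s pset (PySem.Dict.empty : pvMemo) := by
  intro pos t p v hv
  simp [pysem] at hv

lemma pvCountUptoA_pure (nstr : List Char) (pset : PySem.Set Int) :
    pvCountUptoA nstr pset = pvPure (PySem.Chars.zfill nstr 16) pset 16 0 true 0 :=
  (pvDpA_pure (PySem.Chars.zfill nstr 16) pset 16 0 true 0 PySem.Dict.empty (by omega)
    (pvCacheOK_empty _ _)).1

lemma pvBaseTab (s : List Char) (pset : PySem.Set Int) (t : Bool) :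
    (PySem.List.pyRange 0 10 1).map (fun p => pvPure s pset 0 (16 : Int) t p)
      = List.replicate 10 1 := by
  have h1 : ∀ p : Int, pvPure s pset 0 (16 : Int) t p = 1 := by
    intro p; rw [pvPure.eq_def]; simp
  simp only [h1]
  decide

lemma pvCountUptoB_pure (n : Int) (pset : PySem.Set Int) :
    pvCountUptoB n pset = pvPure (PySem.Chars.zfill (PySem.Int.toChars n) 16) pset 16 0 true 0 := by
  unfold pvCountUptoB
  dsimp only
  rw [pvRange_down]
  have hloop := pvLoopB (PySem.Chars.zfill (PySem.Int.toChars n) 16) pset 16 (by omega)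
    (List.replicate 10 1, List.replicate 10 1)
    (by simpa using (pvBaseTab (PySem.Chars.zfill (PySem.Int.toChars n) 16) pset false).symm)
    (by simpa using (pvBaseTab (PySem.Chars.zfill (PySem.Int.toChars n) 16) pset true).symm)
  rw [hloop]
  exact PySem.List.pyGetD_map_pyRange_of_nonneg _ 10 0 0 (by omega) (by omega)


-- ===== VERDICT (by name: the statement is the Claim_ definition above) =====
theorem countGoodIntegersOnPath_spec : Claim_equal_countGoodIntegersOnPath := by
  intro l r directions _ _
  unfold Spec_countGoodIntegersOnPath countGoodIntegersOnPath countGoodIntegersOnPath_alt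
  simp only [pvPath_eq, pvCountUptoA_pure, pvCountUptoB_pure]
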